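-- pv_equiv track=rewrite | github.com/GGN-2015/simple_brainfuck | simple_brainfuck/main.py | serialize_status
-- ===== SOURCE A (Python) =====
-- def serialize_status(mem:dict[int, int]):
--     max_index_set = max([
--         key
--         for key in mem if mem[key] != 0
--     ])
--     return [
--         mem.get(i, 0)
--         for i in range(max_index_set + 1)
--     ]
-- ===== SOURCE B (Python) =====
-- def serialize_status(mem: dict[int, int]):
--     max_index_set = max([
--         key
--         for key in mem if mem[key] != 0
--     ])
--     result = [0] * (max_index_set + 1)
--     for k, v in mem.items():
--         if 0 <= k <= max_index_set:
--             result[k] = v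
--     return result
-- ===== Notes on version B (the rewrite author's own statement) =====
-- stated objective: alternative
-- what changed: B inverts A's pass: instead of gathering mem.get(i, 0) with a dict lookup for every index of range(max+1), it preallocates [0]*(max+1) and scatters mem.items() into it with a 0 <= k <= max guard, so the per-output-index hash lookup disappears.
import Mathlib
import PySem

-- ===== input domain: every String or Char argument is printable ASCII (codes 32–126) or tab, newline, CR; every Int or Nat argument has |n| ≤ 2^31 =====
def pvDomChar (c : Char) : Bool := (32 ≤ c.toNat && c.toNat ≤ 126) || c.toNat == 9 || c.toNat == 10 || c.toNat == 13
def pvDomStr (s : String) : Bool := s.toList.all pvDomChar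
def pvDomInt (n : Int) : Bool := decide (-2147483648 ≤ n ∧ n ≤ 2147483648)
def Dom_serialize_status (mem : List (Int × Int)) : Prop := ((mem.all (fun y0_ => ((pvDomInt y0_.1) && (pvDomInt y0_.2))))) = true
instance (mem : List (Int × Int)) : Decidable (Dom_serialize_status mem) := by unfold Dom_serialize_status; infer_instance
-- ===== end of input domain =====

-- B inverts A's pass: instead of gathering mem.get(i, 0) for each i in range(max+1), it
-- preallocates [0]*(max+1) and scatters mem.items() into it (same return value; no extra claims).

-- ===== PORT A =====
-- max([key for key in mem if mem[key] != 0]) ; Python raises ValueError on an empty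
-- comprehension — that is the `none` branch, excluded by Pre_.
def serialize_status (mem : List (Int × Int)) : List Int :=
  match PySem.List.max?
      ((PySem.Dict.keys (⟨mem⟩ : PySem.Dict Int Int)).filter
        (fun k => PySem.Dict.getD (⟨mem⟩ : PySem.Dict Int Int) k 0 != 0))
      (fun x => x) with
  | none => []  -- unreachable under Pre_ (Python: ValueError)
  | some m =>
      (PySem.List.pyRange 0 (m + 1)).map
        (fun i => PySem.Dict.getD (⟨mem⟩ : PySem.Dict Int Int) i 0)

-- ===== PORT B =====
def serialize_status_alt (mem : List (Int × Int)) : List Int :=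
  match PySem.List.max? ((mem.filter (fun p => p.2 != 0)).map Prod.fst) (fun x => x) with
  | none => []  -- unreachable under Pre_ (Python: ValueError)
  | some m =>
      mem.foldl
        (fun res p => if 0 ≤ p.1 ∧ p.1 ≤ m then res.set p.1.toNat p.2 else res)
        (List.replicate (m + 1).toNat 0)

-- ===== PRECONDITION & SPEC =====
-- The argument is a Python dict, so its keys are distinct (the first conjunct only states that
-- dict invariant); the second conjunct excludes exactly the inputs where max([]) raises
-- ValueError in both A and B (no key with a nonzero value).
def Pre_serialize_status (mem : List (Int × Int)) : Prop :=
  (mem.map Prod.fst).Nodup ∧ ∃ p ∈ mem, p.2 ≠ 0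
instance (mem : List (Int × Int)) : Decidable (Pre_serialize_status mem) := by
  unfold Pre_serialize_status; infer_instance
def pvWitness_serialize_status : (List (Int × Int)) := [(0, 1)]
def Spec_serialize_status (mem : List (Int × Int)) (out : List Int) : Prop :=
  out = serialize_status_alt mem
instance (mem : List (Int × Int)) (out : List Int) : Decidable (Spec_serialize_status mem out) := by
  unfold Spec_serialize_status; infer_instance

-- ===== CLAIM (what is proved, stated in full; the proofs are below) =====
def Claim_equal_serialize_status : Prop :=
  ∀ (mem : List (Int × Int)), Dom_serialize_status mem → Pre_serialize_status mem →
    Spec_serialize_status mem (serialize_status mem)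

-- ===== LEMMAS AND PROOFS =====

-- With distinct keys, A's list of keys with nonzero value is B's map-of-filter of the items.
lemma pv_keys_filter_eq (mem : List (Int × Int)) (h : (mem.map Prod.fst).Nodup) :
    (PySem.Dict.keys (⟨mem⟩ : PySem.Dict Int Int)).filter
        (fun k => PySem.Dict.getD (⟨mem⟩ : PySem.Dict Int Int) k 0 != 0)
      = (mem.filter (fun p => p.2 != 0)).map Prod.fst := by
  induction mem with
  | nil => simp [PySem.Dict.keys]
  | cons hd tl ih =>
    obtain ⟨k, v⟩ := hd
    simp only [List.map_cons, List.nodup_cons] at h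
    have hkeys : PySem.Dict.keys (⟨(k, v) :: tl⟩ : PySem.Dict Int Int)
        = k :: tl.map Prod.fst := by
      simp [PySem.Dict.keys]
    have hheadD : PySem.Dict.getD (⟨(k, v) :: tl⟩ : PySem.Dict Int Int) k 0 = v := by
      simp [PySem.Dict.getD_eq_get?_getD, PySem.Dict.get?_mk_cons]
    have htailD : ∀ x ∈ tl.map Prod.fst,
        (PySem.Dict.getD (⟨(k, v) :: tl⟩ : PySem.Dict Int Int) x 0 != 0)
          = (PySem.Dict.getD (⟨tl⟩ : PySem.Dict Int Int) x 0 != 0) := by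
      intro x hx
      have hne : ¬ (k == x) = true := by
        simp only [beq_iff_eq]
        rintro rfl; exact h.1 hx
      simp [PySem.Dict.getD_eq_get?_getD, PySem.Dict.get?_mk_cons, hne]
    have ih' := ih h.2
    rw [PySem.Dict.keys_mk] at ih'
    rw [hkeys, List.filter_cons, List.filter_congr htailD, ih', hheadD,
      List.filter_cons]
    by_cases hv : (v != 0) = true
    · simp [hv]
    · simp [hv]

-- B's scatter loop preserves the accumulator's length.
lemma pv_scatter_length (m : Int) (mem : List (Int × Int)) (acc : List Int) :
    (mem.foldl
        (fun res p => if 0 ≤ p.1 ∧ p.1 ≤ m then res.set p.1.toNat p.2 else res)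
        acc).length = acc.length := by
  induction mem generalizing acc with
  | nil => rfl
  | cons hd tl ih =>
    rw [List.foldl_cons]
    by_cases hc : 0 ≤ hd.1 ∧ hd.1 ≤ m
    · rw [if_pos hc, ih, List.length_set]
    · rw [if_neg hc, ih]

-- Elementwise value of B's scatter loop: last (= only, by Nodup) write wins, i.e. dict lookup.
lemma pv_scatter_getElem? (m : Int) (mem : List (Int × Int))
    (h : (mem.map Prod.fst).Nodup) (acc : List Int) (i : Nat)
    (hi : (i : Int) ≤ m) (hlen : i < acc.length) :
    (mem.foldl
        (fun res p => if 0 ≤ p.1 ∧ p.1 ≤ m then res.set p.1.toNat p.2 else res)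
        acc)[i]?
      = (PySem.Dict.get? (⟨mem⟩ : PySem.Dict Int Int) (i : Int)).or acc[i]? := by
  induction mem generalizing acc with
  | nil => simp [PySem.Dict.get?]
  | cons hd tl ih =>
    obtain ⟨k, v⟩ := hd
    simp only [List.map_cons, List.nodup_cons] at h
    rw [List.foldl_cons]
    by_cases hk : k = (i : Int)
    · have hc : 0 ≤ k ∧ k ≤ m := by constructor <;> omega
      rw [if_pos hc]
      have hkn : k.toNat = i := by omega
      have hnone : PySem.Dict.get? (⟨tl⟩ : PySem.Dict Int Int) (i : Int) = none := by
        rw [PySem.Dict.get?_eq_none_iff_not_mem_keys]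
        simpa [PySem.Dict.keys, hk] using h.1
      rw [ih h.2 (acc.set k.toNat v) (by simpa using hlen), hnone,
        PySem.Dict.get?_mk_cons]
      simp [hk, hlen]
    · have hne : ¬ (k == (i : Int)) = true := by simp [hk]
      have hstep : ∀ acc' : List Int, acc'.length = acc.length →
          acc'[i]? = acc[i]? →
          (tl.foldl
              (fun res p => if 0 ≤ p.1 ∧ p.1 ≤ m then res.set p.1.toNat p.2 else res)
              acc')[i]?
            = (PySem.Dict.get? (⟨(k, v) :: tl⟩ : PySem.Dict Int Int) (i : Int)).or acc[i]? := by
        intro acc' hl he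
        rw [ih h.2 acc' (by omega), PySem.Dict.get?_mk_cons, he]
        simp [hne]
      by_cases hc : 0 ≤ k ∧ k ≤ m
      · rw [if_pos hc]
        refine hstep _ (by simp) ?_
        have hkn : k.toNat ≠ i := by omega
        simp [hkn]
      · rw [if_neg hc]
        exact hstep acc rfl rfl

-- With the same max m, A's gather and B's scatter produce the same list.
lemma pv_outputs_eq (m : Int) (mem : List (Int × Int)) (h : (mem.map Prod.fst).Nodup) :
    (PySem.List.pyRange 0 (m + 1)).map
        (fun i => PySem.Dict.getD (⟨mem⟩ : PySem.Dict Int Int) i 0)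
      = mem.foldl
          (fun res p => if 0 ≤ p.1 ∧ p.1 ≤ m then res.set p.1.toNat p.2 else res)
          (List.replicate (m + 1).toNat 0) := by
  by_cases hm : 0 ≤ m + 1
  · have hc : m + 1 = (((m + 1).toNat : Nat) : Int) := by omega
    have hrange : PySem.List.pyRange 0 (m + 1)
        = (List.range (m + 1).toNat).map (fun k : Nat => (k : Int)) := by
      conv_lhs => rw [hc]
      exact PySem.List.pyRange_zero_natCast _
    apply List.ext_getElem?
    intro i
    rw [hrange]
    by_cases hi : i < (m + 1).toNat
    · have hile : (i : Int) ≤ m := by omega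
      have hlen : i < (List.replicate (m + 1).toNat (0 : Int)).length := by
        simp only [List.length_replicate]; exact hi
      rw [pv_scatter_getElem? m mem h _ i hile hlen]
      rw [List.getElem?_map, List.getElem?_map, List.getElem?_range hi,
        List.getElem?_replicate, if_pos hi]
      simp only [Option.map_some, PySem.Dict.getD_eq_get?_getD]
      cases PySem.Dict.get? (⟨mem⟩ : PySem.Dict Int Int) (i : Int) <;> simp [Option.or]
    · rw [List.getElem?_eq_none (by simpa using Nat.le_of_not_lt hi),
        List.getElem?_eq_none
          (by rw [pv_scatter_length, List.length_replicate]; exact Nat.le_of_not_lt hi)]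
  · have hz : (m + 1).toNat = 0 := by omega
    have hrange : PySem.List.pyRange 0 (m + 1) = [] := by
      simp [PySem.List.pyRange]
      omega
    rw [hrange, List.map_nil]
    exact (List.eq_nil_of_length_eq_zero
      (by rw [pv_scatter_length, List.length_replicate, hz])).symm

-- ===== VERDICT (by name: the statement is the Claim_ definition above) =====
theorem serialize_status_spec : Claim_equal_serialize_status := by
  intro mem _ hpre
  unfold Spec_serialize_status serialize_status serialize_status_alt
  rw [pv_keys_filter_eq mem hpre.1]
  cases hmax :
      PySem.List.max? ((mem.filter (fun p => p.2 != 0)).map Prod.fst) (fun x => x) with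
  | none => rfl
  | some m => exact pv_outputs_eq m mem hpre.1
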